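-- pv_equiv track=rewrite | github.com/Just-Jojo/yes | utils/chat_formatting.py | pagify
-- ===== SOURCE A (Python) =====
-- def pagify(text: str, page_length: int = 300) -> list:
--     in_text = text
--     ret = []
--     while len(in_text) > page_length:
--         p_len = page_length
--         delim = in_text.rfind("\n", 0, page_length)
--         delim = delim if delim != -1 else p_len
--         to_send = in_text[:delim]
--         if len(to_send.strip()) > 0:
--             ret.append(to_send)
--         in_text = in_text[delim:]
--     if len(in_text.strip()) > 0:
--         ret.append(in_text)
--     return ret
-- ===== SOURCE B (Python) =====
-- def pagify(text: str, page_length: int = 300) -> list: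
--     # One pass to index all newline positions, then an absolute cursor walk with a
--     # monotone pointer into that index: no per-page rfind rescan, no repeated
--     # copying of the remaining suffix.
--     n = len(text)
--     nls = [i for i, c in enumerate(text) if c == "\n"]
--     pages = []
--     start = 0
--     j = 0  # index into nls of the first newline at or past start
--     while n - start > page_length:
--         k = j
--         while k < len(nls) and nls[k] < start + page_length:
--             k += 1
--         if k > j:
--             delim = nls[k - 1]
--             j = k - 1
--         else:
--             delim = start + page_length
--             j = k
--         page = text[start:delim]
--         if page.strip():
--             pages.append(page)
--         start = delim
--     tail = text[start:]
--     if tail.strip():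
--         pages.append(tail)
--     return pages
-- ===== Notes on version B (the rewrite author's own statement) =====
-- stated objective: alternative
-- what changed: B precomputes all newline positions in one pass and walks an absolute cursor with a monotone pointer into that index, instead of A's per-iteration rfind rescan and copy of the remaining text after every page; asymptotically this avoids A's repeated O(n) suffix copies, though a timing run could not measure a speedup at its sizes.
import Mathlib
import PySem

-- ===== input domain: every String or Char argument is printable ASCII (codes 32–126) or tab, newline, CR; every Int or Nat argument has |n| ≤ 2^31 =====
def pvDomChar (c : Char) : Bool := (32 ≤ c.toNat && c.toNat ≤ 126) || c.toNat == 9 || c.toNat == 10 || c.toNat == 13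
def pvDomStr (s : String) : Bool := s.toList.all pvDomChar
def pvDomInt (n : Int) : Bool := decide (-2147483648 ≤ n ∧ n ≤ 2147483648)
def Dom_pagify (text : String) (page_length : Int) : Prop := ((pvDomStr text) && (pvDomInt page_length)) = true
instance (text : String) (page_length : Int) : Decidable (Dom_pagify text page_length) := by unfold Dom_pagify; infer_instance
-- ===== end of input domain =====

-- B replaces A's per-page rfind rescan and repeated suffix copying with a one-pass newline
-- index walked by a monotone pointer and an absolute cursor over the original text.

-- ===== PORT A =====
-- A's while-loop as fuel-bounded recursion over the remaining text; the fuel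
-- (length+1) is never exhausted on inputs satisfying Pre_pagify (the loop shortens
-- the text each iteration there); on other inputs the Python loop does not terminate.
def pagifyLoopA (page_length : Int) : Nat → List Char → List (List Char) → List (List Char)
  | 0, _in_text, ret => ret
  | Nat.succ fuel, in_text, ret =>
    if (in_text.length : Int) > page_length then       -- while len(in_text) > page_length
      let p_len := page_length
      let d := PySem.Chars.rfindFrom in_text ['\n'] 0 (some page_length)  -- in_text.rfind("\n", 0, page_length)
      let delim := if d ≠ -1 then d else p_len
      let to_send := PySem.List.slice in_text none (some delim)           -- in_text[:delim]
      let ret' := if (PySem.Chars.strip to_send).length > 0 then ret ++ [to_send] else ret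
      pagifyLoopA page_length fuel (PySem.List.slice in_text (some delim) none) ret'  -- in_text = in_text[delim:]
    else
      if (PySem.Chars.strip in_text).length > 0 then ret ++ [in_text] else ret

def pagify (text : String) (page_length : Int) : List String :=
  (pagifyLoopA page_length (text.toList.length + 1) text.toList []).map (fun cs => String.ofList cs)

-- ===== PORT B =====
-- the inner `while k < len(nls) and nls[k] < bound: k += 1` of Source B
def pvAdvance (nls : List Int) (bound : Int) (k : Nat) : Nat :=
  match h : nls[k]? with
  | some v => if v < bound then pvAdvance nls bound (k+1) else k
  | none => k
termination_by nls.length - k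
decreasing_by
  have := (List.getElem?_eq_some_iff.mp h).1
  omega

-- Source B's outer while-loop, fuel-bounded exactly like A's (same non-termination cases)
def pagifyLoopB (cs : List Char) (n : Nat) (nls : List Int) (page_length : Int) :
    Nat → Int → Nat → List (List Char) → List (List Char)
  | 0, _start, _j, pages => pages
  | Nat.succ fuel, start, j, pages =>
    if (n : Int) - start > page_length then            -- while n - start > page_length
      let k := pvAdvance nls (start + page_length) j
      -- if k > j: delim, j = nls[k-1], k-1  else: delim, j = start+page_length, k
      -- (nls.getD (k-1) 0 = Python nls[k-1]: k-1 < len(nls) whenever k > j)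
      let dj : Int × Nat := if k > j then (nls.getD (k-1) 0, k-1) else (start + page_length, k)
      let page := PySem.List.slice cs (some start) (some dj.1)            -- text[start:delim]
      let pages' := if PySem.Chars.strip page ≠ [] then pages ++ [page] else pages  -- if page.strip():
      pagifyLoopB cs n nls page_length fuel dj.1 dj.2 pages'
    else
      let tail := PySem.List.slice cs (some start) none                   -- text[start:]
      if PySem.Chars.strip tail ≠ [] then pages ++ [tail] else pages

def pagify_alt (text : String) (page_length : Int) : List String :=
  let cs := text.toList
  -- nls = [i for i, c in enumerate(text) if c == "\n"]
  let nls := ((PySem.List.enumerate cs).filter (fun p => p.2 == '\n')).map Prod.fst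
  (pagifyLoopB cs cs.length nls page_length (cs.length + 1) 0 0 []).map (fun cs => String.ofList cs)

-- ===== PRECONDITION & SPEC =====
-- Pre_pagify excludes exactly the inputs on which Python A never returns (its while-loop
-- makes no progress and spins forever): a non-positive page_length with text longer than
-- page_length, or a newline followed by no further newline within page_length characters
-- while more than page_length characters remain after it.  A returns on every other input.
def Pre_pagify (text : String) (page_length : Int) : Prop :=
  (text.toList.length : Int) ≤ page_length ∨
  (1 ≤ page_length ∧ ∀ p : Nat, p < text.toList.length → text.toList[p]? = some '\n' →
    (text.toList.length : Int) - (p : Int) > page_length →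
    ∃ q : Nat, q < text.toList.length ∧ p < q ∧ (q : Int) < (p : Int) + page_length ∧
      text.toList[q]? = some '\n')
instance (text : String) (page_length : Int) : Decidable (Pre_pagify text page_length) := by
  unfold Pre_pagify; infer_instance

def pvWitness_pagify : String × Int := ("aa\nbb\ncc", 4)

def Spec_pagify (text : String) (page_length : Int) (out : List String) : Prop := out = pagify_alt text page_length
instance (text : String) (page_length : Int) (out : List String) : Decidable (Spec_pagify text page_length out) := by unfold Spec_pagify; infer_instance

-- ===== CLAIM (what is proved, stated in full; the proofs are below) =====
def Claim_equal_pagify : Prop := ∀ (text : String) (page_length : Int), Dom_pagify text page_length → Pre_pagify text page_length → Spec_pagify text page_length (pagify text page_length)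

-- ===== LEMMAS AND PROOFS =====

-- `[c]` is a prefix exactly of lists starting with c
lemma pv_single_isPrefixOf (c : Char) (l : List Char) :
    [c].isPrefixOf l = true ↔ l.head? = some c := by
  cases l with
  | nil => simp [List.isPrefixOf]
  | cons a t =>
    simp [List.isPrefixOf]
    exact eq_comm

lemma pv_go_eq_neg (W : List Char) (m : Nat) (h : ∀ i, i ≤ m → W[i]? ≠ some '\n') :
    PySem.Chars.rfind.go W ['\n'] m = -1 := by
  induction m with
  | zero =>
    have h0 : ¬ ([ '\n' ].isPrefixOf W = true) := by
      rw [pv_single_isPrefixOf, List.head?_eq_getElem?]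
      exact h 0 (le_refl 0)
    simp [PySem.Chars.rfind.go, h0]
  | succ j ih =>
    have hj1 : ¬ ([ '\n' ].isPrefixOf (W.drop (j+1)) = true) := by
      rw [pv_single_isPrefixOf, List.head?_drop]
      exact h (j+1) (le_refl _)
    have := ih (fun i hi => h i (Nat.le_succ_of_le hi))
    simp [PySem.Chars.rfind.go, hj1, this]

lemma pv_go_eq_found (W : List Char) (m p : Nat) (hp : p ≤ m) (hW : W[p]? = some '\n')
    (hmax : ∀ i, p < i → i ≤ m → W[i]? ≠ some '\n') :
    PySem.Chars.rfind.go W ['\n'] m = (p : Int) := by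
  induction m with
  | zero =>
    have hp0 : p = 0 := Nat.le_zero.mp hp
    subst hp0
    have h0 : [ '\n' ].isPrefixOf W = true := by
      rw [pv_single_isPrefixOf, List.head?_eq_getElem?]; exact hW
    simp [PySem.Chars.rfind.go, h0]
  | succ j ih =>
    by_cases hpe : p = j + 1
    · subst hpe
      have h0 : [ '\n' ].isPrefixOf (W.drop (j+1)) = true := by
        rw [pv_single_isPrefixOf, List.head?_drop]; exact hW
      simp [PySem.Chars.rfind.go, h0]
    · have hple : p ≤ j := by omega
      have hj1 : ¬ ([ '\n' ].isPrefixOf (W.drop (j+1)) = true) := by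
        rw [pv_single_isPrefixOf, List.head?_drop]
        exact hmax (j+1) (by omega) (le_refl _)
      have := ih hple (fun i hi hi2 => hmax i hi (Nat.le_succ_of_le hi2))
      simp [PySem.Chars.rfind.go, hj1, this]

-- in_text.rfind("\n", 0, L) for 0 < L < len(in_text) searches in_text[:L]
lemma pv_rfindFrom_take (sfx : List Char) (L : Int) (h1 : 0 < L) (h2 : L < (sfx.length : Int)) :
    PySem.Chars.rfindFrom sfx ['\n'] 0 (some L) = PySem.Chars.rfind (sfx.take L.toNat) ['\n'] := by
  have hA : ¬ ((sfx.length : Int) < L) := by omega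
  have hB : ¬ (L < (0 : Int)) := by omega
  have hC : ¬ ((0 : Int) < 0) := by omega
  simp only [PySem.Chars.rfindFrom, hA, hB, hC, if_false, Int.toNat_zero, List.drop_zero,
    zero_add]
  by_cases hr : PySem.Chars.rfind (sfx.take L.toNat) ['\n'] = -1
  · rw [if_pos hr, hr]
  · rw [if_neg hr]

-- specification of pvAdvance: it stops at the first index ≥ j whose entry is ≥ bound
lemma pv_advance_ge (nls : List Int) (bound : Int) (j : Nat) (hj : j ≤ nls.length) :
    j ≤ pvAdvance nls bound j ∧ pvAdvance nls bound j ≤ nls.length ∧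
    (∀ i (hi : i < nls.length), j ≤ i → i < pvAdvance nls bound j → nls[i] < bound) ∧
    (∀ hk : pvAdvance nls bound j < nls.length, bound ≤ nls[pvAdvance nls bound j]) := by
  revert hj
  fun_induction pvAdvance nls bound j with
  | case1 k v hgk hvb ih =>
    intro hj
    have hk : k < nls.length := (List.getElem?_eq_some_iff.mp hgk).1
    have hkv : nls[k] = v := by
      have := (List.getElem?_eq_some_iff.mp hgk).2; simpa using this
    obtain ⟨i1, i2, i3, i4⟩ := ih (by omega)
    refine ⟨by omega, i2, ?_, i4⟩
    intro i hi hji hik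
    by_cases hik' : i = k
    · subst hik'; simpa [hkv] using hvb
    · exact i3 i hi (by omega) hik
  | case2 k v hgk hvb =>
    intro hj
    have hk : k < nls.length := (List.getElem?_eq_some_iff.mp hgk).1
    have hkv : nls[k] = v := by
      have := (List.getElem?_eq_some_iff.mp hgk).2; simpa using this
    exact ⟨le_refl _, by omega, by omega, fun _ => by rw [hkv]; omega⟩
  | case3 k hgk =>
    intro hj
    have hk : nls.length ≤ k := List.getElem?_eq_none_iff.mp hgk
    exact ⟨le_refl _, by omega, fun i hi h1 h2 => by omega, fun h => by omega⟩

-- the newline index built by Source B equals the filtered range, shifted by the start value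
def pvN (cs : List Char) : List Nat :=
  (List.range cs.length).filter (fun q => cs[q]? == some '\n')

lemma pv_enum_filter (cs : List Char) (s : Int) :
    ((PySem.List.enumerate cs s).filter (fun p => p.2 == '\n')).map Prod.fst
    = (pvN cs).map (fun q => s + (q : Nat)) := by
  induction cs generalizing s with
  | nil => simp [PySem.List.enumerate, pvN]
  | cons c t ih =>
    have henum : PySem.List.enumerate (c::t) s = (s, c) :: PySem.List.enumerate t (s+1) := by
      simp [PySem.List.enumerate]
    have hN : pvN (c::t)
        = (if (c == '\n') then [0] else []) ++ (pvN t).map (fun q => q + 1) := by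
      simp only [pvN, List.length_cons, List.range_succ_eq_map, List.filter_cons,
        List.filter_map]
      by_cases hc : c = '\n'
      · simp [hc, Function.comp_def]
      · simp [hc, Function.comp_def]
    rw [henum, hN]
    by_cases hc : c = '\n'
    · simp only [List.filter_cons, hc, beq_self_eq_true, if_true, List.map_cons, ih,
        List.map_append, List.map_map]
      simp [Function.comp_def]
      intro a _
      omega
    · have hcb : (c == '\n') = false := by simp [hc]
      simp only [List.filter_cons, hcb, if_false, Bool.false_eq_true, ih]
      simp [Function.comp_def]
      intro a _
      omega

lemma pv_N_mem (cs : List Char) (q : Nat) :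
    q ∈ pvN cs ↔ q < cs.length ∧ cs[q]? = some '\n' := by
  simp [pvN, List.mem_filter, List.mem_range]

lemma pv_N_sorted (cs : List Char) : (pvN cs).Pairwise (· < ·) :=
  (List.pairwise_lt_range).filter _

-- the main lockstep lemma: A's loop over the suffix text[s:] computes exactly B's loop
-- at cursor s, provided 1 ≤ L and the no-stall condition G of Pre_pagify holds
lemma pv_loop_eq (cs : List Char) (L : Int) (hL : 1 ≤ L)
    (G : ∀ p : Nat, p < cs.length → cs[p]? = some '\n' →
        (cs.length : Int) - (p : Int) > L →
        ∃ q : Nat, q < cs.length ∧ p < q ∧ (q : Int) < (p : Int) + L ∧ cs[q]? = some '\n') :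
    ∀ (fuel s j : Nat) (pages : List (List Char)),
      s ≤ cs.length → cs.length - s < fuel → j ≤ (pvN cs).length →
      (∀ i (hi : i < (pvN cs).length), i < j → (pvN cs)[i] < s) →
      (∀ i (hi : i < (pvN cs).length), j ≤ i → s ≤ (pvN cs)[i]) →
      pagifyLoopA L fuel (cs.drop s) pages
        = pagifyLoopB cs cs.length ((pvN cs).map (Nat.cast : Nat → Int)) L fuel (s : Int) j pages := by
  intro fuel
  induction fuel with
  | zero => intro s j pages hs hfuel _ _ _; omega
  | succ fuel ih =>
    intro s j pages hs hfuel hj hlt hge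
    have hNs := pv_N_sorted cs
    have hmono : ∀ (i1 i2 : Nat) (h1 : i1 < (pvN cs).length) (h2 : i2 < (pvN cs).length),
        i1 < i2 → (pvN cs)[i1] < (pvN cs)[i2] :=
      fun i1 i2 h1 h2 h12 => List.pairwise_iff_getElem.mp hNs i1 i2 h1 h2 h12
    have hNmemToIdx : ∀ q : Nat, q < cs.length → cs[q]? = some '\n' →
        ∃ idx, ∃ h : idx < (pvN cs).length, (pvN cs)[idx] = q := by
      intro q hq hqc
      have hqmem : q ∈ pvN cs := (pv_N_mem cs q).mpr ⟨hq, hqc⟩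
      simpa [List.mem_iff_getElem] using hqmem
    have hNidx : ∀ (i : Nat) (h : i < (pvN cs).length),
        (pvN cs)[i] < cs.length ∧ cs[(pvN cs)[i]]? = some '\n' :=
      fun i h => (pv_N_mem cs _).mp (List.getElem_mem h)
    have hmaplen : ((pvN cs).map (Nat.cast : Nat → Int)).length = (pvN cs).length := by simp
    have hmapget : ∀ (i : Nat) (h : i < (pvN cs).length),
        ((pvN cs).map (Nat.cast : Nat → Int))[i]'(by simpa using h) = (((pvN cs)[i] : Nat) : Int) := by
      intro i h; simp only [List.getElem_map]
    have hlend : (cs.drop s).length = cs.length - s := by simp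
    simp only [pagifyLoopA, pagifyLoopB]
    by_cases hg : (cs.length : Int) - (s : Int) > L
    · -- one loop iteration on each side
      have hgA : ((cs.drop s).length : Int) > L := by rw [hlend]; omega
      rw [if_pos hgA, if_pos hg]
      -- window facts
      have hLts : s + L.toNat < cs.length := by omega
      have hWlen : ((cs.drop s).take L.toNat).length = L.toNat := by
        simp [hlend]; omega
      have hWget : ∀ i : Nat, i < L.toNat → ((cs.drop s).take L.toNat)[i]? = cs[s + i]? := by
        intro i hi
        rw [List.getElem?_take_of_lt hi, List.getElem?_drop]
      have hWnone : ((cs.drop s).take L.toNat)[L.toNat]? = none := by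
        rw [List.getElem?_eq_none_iff, hWlen]
      have hd0 : PySem.Chars.rfindFrom (cs.drop s) ['\n'] 0 (some L)
          = PySem.Chars.rfind ((cs.drop s).take L.toNat) ['\n'] :=
        pv_rfindFrom_take _ _ (by omega) (by rw [hlend]; omega)
      obtain ⟨hjk, hkle, hbelow, habove⟩ :=
        pv_advance_ge ((pvN cs).map (Nat.cast : Nat → Int)) ((s : Int) + L) j (by omega)
      rw [hmaplen] at hkle
      set k := pvAdvance ((pvN cs).map (Nat.cast : Nat → Int)) ((s : Int) + L) j with hkdef
      rcases Nat.lt_or_ge j k with hjlt | hjge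
      · -- k > j : break at newline p = N[k-1]
        have hk1 : k - 1 < (pvN cs).length := by omega
        set p := (pvN cs)[k-1]'hk1 with hpdef
        have hpn : p < cs.length := (hNidx _ hk1).1
        have hpc : cs[p]? = some '\n' := (hNidx _ hk1).2
        have hsp : s ≤ p := hge _ hk1 (by omega)
        have hpL : (p : Int) < (s : Int) + L := by
          have := hbelow (k-1) (by simpa using hk1) (by omega) (by omega)
          rw [hmapget _ hk1] at this
          exact this
        have hmaxq : ∀ q : Nat, p < q → (q : Int) < (s : Int) + L → cs[q]? ≠ some '\n' := by
          intro q hpq hqL hqc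
          obtain ⟨idx, hidx, hidxq⟩ := hNmemToIdx q (by omega) hqc
          have hidxk : k ≤ idx := by
            by_contra hcon
            rcases Nat.lt_or_ge idx (k-1) with h' | h'
            · have := hmono idx (k-1) hidx hk1 h'
              omega
            · have : idx = k - 1 := by omega
              subst this
              omega
          have hklen : k < (pvN cs).length := by omega
          have hb := habove (by simpa using hklen)
          rw [hmapget _ hklen] at hb
          have : (pvN cs)[k]'hklen ≤ q := by
            rcases Nat.lt_or_ge k idx with h' | h'
            · exact Nat.le_of_lt (by rw [← hidxq]; exact hmono k idx hklen hidx h')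
            · have : idx = k := by omega
              subst this
              omega
          omega
        have hsp' : s < p := by
          rcases Nat.lt_or_ge s p with h' | h'
          · exact h'
          · exfalso
            have hps : p = s := by omega
            obtain ⟨q, hq1, hq2, hq3, hq4⟩ := G p hpn hpc (by omega)
            exact hmaxq q hq2 (by omega) hq4
        -- A's rfind finds relative position p - s
        have hfound : PySem.Chars.rfind ((cs.drop s).take L.toNat) ['\n'] = ((p - s : Nat) : Int) := by
          have hrel : p - s < L.toNat := by omega
          unfold PySem.Chars.rfind
          rw [hWlen]
          apply pv_go_eq_found _ _ _ (by omega)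
          · rw [hWget _ hrel]
            have : s + (p - s) = p := by omega
            rw [this]; exact hpc
          · intro i hi1 hi2
            rcases Nat.lt_or_ge i L.toNat with h' | h'
            · rw [hWget _ h']
              exact hmaxq (s + i) (by omega) (by omega)
            · have : i = L.toNat := by omega
              subst this
              rw [hWnone]
              simp
        rw [hd0, hfound]
        have hdne : (((p - s : Nat) : Int)) ≠ -1 := by omega
        rw [if_pos hdne, if_pos hjlt]
        -- B's delim is p
        have hgetD : ((pvN cs).map (Nat.cast : Nat → Int)).getD (k-1) 0 = ((p : Nat) : Int) := by
          rw [List.getD_eq_getElem _ _ (by simpa using hk1)]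
          exact hmapget _ hk1
        rw [hgetD]
        -- the two pages agree
        have hpage : PySem.List.slice (cs.drop s) none (some ((p - s : Nat) : Int))
            = PySem.List.slice cs (some (s : Int)) (some ((p : Nat) : Int)) := by
          rw [PySem.List.slice_to_natCast, PySem.List.slice_natCast]
        rw [hpage]
        -- the two next states agree
        have hnext : PySem.List.slice (cs.drop s) (some ((p - s : Nat) : Int)) none
            = cs.drop p := by
          rw [PySem.List.slice_from_natCast, List.drop_drop]
          congr 1
          omega
        rw [hnext]
        -- recurse
        have hrec := ih p (k-1) (if PySem.Chars.strip (PySem.List.slice cs (some (s : Int)) (some ((p : Nat) : Int))) ≠ [] then pages ++ [PySem.List.slice cs (some (s : Int)) (some ((p : Nat) : Int))] else pages)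
          (by omega) (by omega) (by omega)
          (fun i hi hik => by
            rcases Nat.lt_or_ge i (k-1) with h' | h'
            · exact hmono i (k-1) hi hk1 h'
            · omega)
          (fun i hi hik => by
            rcases Nat.lt_or_ge (k-1) i with h' | h'
            · exact Nat.le_of_lt (hmono (k-1) i hk1 hi h')
            · have : i = k - 1 := by omega
              subst this
              exact le_refl _)
        rw [← hrec]
        by_cases hstrip : PySem.Chars.strip (PySem.List.slice cs (some (s : Int)) (some ((p : Nat) : Int))) = []
        · rw [if_neg (by simp [hstrip]), if_neg (by simp [hstrip])]
        · rw [if_pos (by simp [List.length_pos_iff, hstrip]), if_pos hstrip]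
      · -- k = j : no newline in the window, cut at page_length
        have hkj : k = j := by omega
        have hnonl : ∀ q : Nat, s ≤ q → (q : Int) < (s : Int) + L → cs[q]? ≠ some '\n' := by
          intro q hsq hqL hqc
          obtain ⟨idx, hidx, hidxq⟩ := hNmemToIdx q (by omega) hqc
          have hidxj : j ≤ idx := by
            by_contra hcon
            have := hlt idx hidx (by omega)
            omega
          have hklen : k < (pvN cs).length := by omega
          have hb := habove (by simpa using hklen)
          rw [hmapget _ hklen] at hb
          have : (pvN cs)[k]'hklen ≤ q := by
            rcases Nat.lt_or_ge k idx with h' | h'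
            · exact Nat.le_of_lt (by rw [← hidxq]; exact hmono k idx hklen hidx h')
            · have : idx = k := by omega
              subst this
              omega
          omega
        have hnone : PySem.Chars.rfind ((cs.drop s).take L.toNat) ['\n'] = -1 := by
          unfold PySem.Chars.rfind
          rw [hWlen]
          apply pv_go_eq_neg
          intro i hi
          rcases Nat.lt_or_ge i L.toNat with h' | h'
          · rw [hWget _ h']
            exact hnonl (s + i) (by omega) (by omega)
          · have : i = L.toNat := by omega
            subst this
            rw [hWnone]
            simp
        rw [hd0, hnone]
        rw [if_neg (show ¬((-1 : Int) ≠ -1) by simp), if_neg (show ¬(k > j) by omega)]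
        -- both cut at s + L
        have hcast : (s : Int) + L = ((s + L.toNat : Nat) : Int) := by omega
        have hpage : PySem.List.slice (cs.drop s) none (some L)
            = PySem.List.slice cs (some (s : Int)) (some ((s : Int) + L)) := by
          rw [hcast, PySem.List.slice_natCast, PySem.List.slice_to _ (by omega : (0:Int) ≤ L)]
          congr 1
          omega
        rw [hpage]
        have hnext : PySem.List.slice (cs.drop s) (some L) none = cs.drop (s + L.toNat) := by
          rw [PySem.List.slice_from _ (by omega : (0:Int) ≤ L), List.drop_drop]
        rw [hnext]
        have hrec := ih (s + L.toNat) j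
          (if PySem.Chars.strip (PySem.List.slice cs (some (s : Int)) (some ((s : Int) + L))) ≠ [] then pages ++ [PySem.List.slice cs (some (s : Int)) (some ((s : Int) + L))] else pages)
          (by omega) (by omega) (by omega)
          (fun i hi hik => by
            have := hlt i hi hik
            omega)
          (fun i hi hik => by
            have hklen : i < (pvN cs).length := hi
            have hb := habove (by simpa using (show k < (pvN cs).length by omega))
            rw [hmapget _ (by omega)] at hb
            have hki : (pvN cs)[k]'(by omega) ≤ (pvN cs)[i]'hi := by
              rcases Nat.lt_or_ge k i with h' | h'
              · exact Nat.le_of_lt (hmono k i (by omega) hi h')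
              · have : i = k := by omega
                subst this
                exact le_refl _
            omega)
        rw [← hcast] at hrec
        rw [show (((s : Int) + L, k).1) = (s : Int) + L from rfl,
          show (((s : Int) + L, k).2) = k from rfl, hkj]
        rw [← hrec]
        by_cases hstrip : PySem.Chars.strip (PySem.List.slice cs (some (s : Int)) (some ((s : Int) + L))) = []
        · rw [if_neg (show ¬((PySem.Chars.strip (PySem.List.slice cs (some (s : Int)) (some ((s : Int) + L)))).length > 0) by simp [hstrip]),
            if_neg (show ¬(PySem.Chars.strip (PySem.List.slice cs (some (s : Int)) (some ((s : Int) + L))) ≠ []) by simp [hstrip])]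
        · rw [if_pos (show (PySem.Chars.strip (PySem.List.slice cs (some (s : Int)) (some ((s : Int) + L)))).length > 0 by
              simp [List.length_pos_iff, hstrip]), if_pos hstrip]
    · -- exit: append the remaining tail on both sides
      have hgA : ¬ (((cs.drop s).length : Int) > L) := by rw [hlend]; omega
      rw [if_neg hgA, if_neg hg]
      have htail : PySem.List.slice cs (some (s : Int)) none = cs.drop s :=
        PySem.List.slice_from_natCast cs s
      rw [htail]
      by_cases hstrip : PySem.Chars.strip (cs.drop s) = []
      · rw [if_neg (by simp [hstrip]), if_neg (by simp [hstrip])]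
      · rw [if_pos (by simp [List.length_pos_iff, hstrip]), if_pos hstrip]

-- ===== VERDICT (by name: the statement is the Claim_ definition above) =====
lemma pv_nls_eq (cs : List Char) :
    ((PySem.List.enumerate cs).filter (fun p => p.2 == '\n')).map Prod.fst
    = (pvN cs).map (Nat.cast : Nat → Int) := by
  rw [pv_enum_filter cs 0]
  apply List.map_congr_left
  intro a _
  simp

theorem pagify_spec : Claim_equal_pagify := by
  unfold Claim_equal_pagify Spec_pagify
  intro text L _hdom hpre
  simp only [pagify, pagify_alt]
  rw [pv_nls_eq]
  congr 1
  rcases hpre with hshort | ⟨hL, G⟩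
  · -- text fits in one page: neither loop runs
    simp only [pagifyLoopA, pagifyLoopB]
    rw [if_neg (show ¬ ((text.toList.length : Int) > L) by omega),
      if_neg (show ¬ ((text.toList.length : Int) - 0 > L) by omega)]
    have htail : PySem.List.slice text.toList (some (0 : Int)) none = text.toList := by
      rw [PySem.List.slice_from _ le_rfl]
      simp
    rw [htail]
    by_cases hstrip : PySem.Chars.strip text.toList = []
    · rw [if_neg (by simp [hstrip]), if_neg (by simp [hstrip])]
    · rw [if_pos (by simp [List.length_pos_iff, hstrip]), if_pos hstrip]
  · have h := pv_loop_eq text.toList L hL G (text.toList.length + 1) 0 0 []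
      (by omega) (by omega) (by omega)
      (fun i hi h => by omega) (fun i hi h => by omega)
    simpa using h
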